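-- pv_equiv track=rewrite | github.com/turnstilelabs/arxitex | arxitex/tools/retrieval/msc2020.py | _best_subset_match
-- ===== SOURCE A (Python) =====
-- from typing import Dict, Iterable, List, Optional, Set
--
-- def _best_subset_match(
--     tokens: List[str], token_map: Dict[str, Set[str]]
-- ) -> Optional[str]:
--     required = set(tokens)
--     if not required:
--         return None
--     matches = []
--     for code, corpus_tokens in token_map.items():
--         if required.issubset(corpus_tokens):
--             matches.append(code)
--     if not matches:
--         return None
--     # deterministic tie-break: smaller token space first, then lexical code
--     matches.sort(key=lambda c: (len(token_map[c]), c))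
--     return matches[0]
-- ===== SOURCE B (Python) =====
-- from typing import Dict, List, Optional, Set
--
--
-- def _best_subset_match(
--     tokens: List[str], token_map: Dict[str, Set[str]]
-- ) -> Optional[str]:
--     required = set(tokens)
--     if not required:
--         return None
--     best = None  # (len(corpus_tokens), code) of the best candidate so far
--     for code, corpus_tokens in token_map.items():
--         if required.issubset(corpus_tokens):
--             key = (len(corpus_tokens), code)
--             if best is None or key < best:
--                 best = key
--     return best[1] if best is not None else None
-- ===== Notes on version B (the rewrite author's own statement) =====
-- stated objective: alternative
-- what changed: Replaced the collect-then-sort two-phase algorithm (build a matches list, sort it by (len(token_map[c]), c), take [0]) with a single pass over token_map.items() that keeps only the running-minimum (len, code) key, eliminating the matches list, the sort and the dict re-lookup in the sort key.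
import Mathlib
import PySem

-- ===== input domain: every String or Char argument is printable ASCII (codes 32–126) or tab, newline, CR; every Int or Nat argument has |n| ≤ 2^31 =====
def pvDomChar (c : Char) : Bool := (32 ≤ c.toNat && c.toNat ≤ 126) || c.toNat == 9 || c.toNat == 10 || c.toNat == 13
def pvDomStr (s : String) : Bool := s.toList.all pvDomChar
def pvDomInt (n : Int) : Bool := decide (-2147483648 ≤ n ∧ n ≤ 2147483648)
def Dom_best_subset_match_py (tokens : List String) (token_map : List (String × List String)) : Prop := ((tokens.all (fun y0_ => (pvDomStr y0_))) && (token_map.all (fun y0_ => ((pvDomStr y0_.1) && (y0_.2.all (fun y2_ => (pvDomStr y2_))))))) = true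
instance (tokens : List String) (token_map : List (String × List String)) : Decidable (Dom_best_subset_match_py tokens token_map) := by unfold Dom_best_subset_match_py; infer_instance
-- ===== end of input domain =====

-- B replaces A's collect-then-sort (build matches, sort by (len, code), take [0]) with a
-- single pass keeping the running-minimum (len, code) key: an alternative decomposition.


-- ===== PORT A =====
-- token_map[c] inside the sort key is ported as Dict.getD with default []: every c in
-- matches is a key of token_map, so the default is never used and no KeyError can occur.
def best_subset_match_py (tokens : List String) (token_map : List (String × List String)) : Option String :=
  let required : PySem.Set String := PySem.Set.ofList tokens
  if required = [] then none
  else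
    let mlist : List String :=
      token_map.foldl
        (fun ms p => if PySem.Set.issubset required p.2 then ms ++ [p.1] else ms) []
    if mlist = [] then none
    else
      (PySem.List.sorted2 mlist
        (fun c => (PySem.Dict.getD ⟨token_map⟩ c ([] : List String)).length) (fun c => c)).head?

-- ===== PORT B =====
-- Python tuple comparison on (len, code) keys: lexicographic.
def bsmKeyLt (a b : Nat × String) : Bool :=
  decide (a.1 < b.1) || (decide (a.1 = b.1) && decide (a.2 < b.2))

def best_subset_match_py_alt (tokens : List String) (token_map : List (String × List String)) : Option String :=
  let required : PySem.Set String := PySem.Set.ofList tokens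
  if required = [] then none
  else
    (token_map.foldl
      (fun best p =>
        if PySem.Set.issubset required p.2 then
          match best with
          | none => some (p.2.length, p.1)
          | some b => if bsmKeyLt (p.2.length, p.1) b then some (p.2.length, p.1) else some b
        else best)
      none).map Prod.snd

-- ===== PRECONDITION & SPEC =====
-- Pre_ is the representation invariant of the Python argument type Dict[str, Set[str]] under
-- the type convention: an association list with a duplicate key, or a value list with a
-- duplicate element, does not denote any Python dict-of-sets input (a dict cannot hold two
-- bindings of one key, a set cannot hold an element twice), so nothing is claimed there.
def Pre_best_subset_match_py (tokens : List String) (token_map : List (String × List String)) : Prop :=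
  (token_map.map Prod.fst).Nodup ∧ ∀ p ∈ token_map, p.2.Nodup
instance (tokens : List String) (token_map : List (String × List String)) : Decidable (Pre_best_subset_match_py tokens token_map) := by unfold Pre_best_subset_match_py; infer_instance

def pvWitness_best_subset_match_py : List String × (List (String × List String)) :=
  (["a"], [("x", ["a", "b"]), ("y", ["a"])])

def Spec_best_subset_match_py (tokens : List String) (token_map : List (String × List String)) (out : Option String) : Prop := out = best_subset_match_py_alt tokens token_map
instance (tokens : List String) (token_map : List (String × List String)) (out : Option String) : Decidable (Spec_best_subset_match_py tokens token_map out) := by unfold Spec_best_subset_match_py; infer_instance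

-- ===== CLAIM (what is proved, stated in full; the proofs are below) =====
def Claim_equal_best_subset_match_py : Prop := ∀ (tokens : List String) (token_map : List (String × List String)), Dom_best_subset_match_py tokens token_map → Pre_best_subset_match_py tokens token_map → Spec_best_subset_match_py tokens token_map (best_subset_match_py tokens token_map)

-- ===== LEMMAS AND PROOFS =====

-- The (size, code) key of a token_map entry, as B maintains it.
def bsmKf (p : String × List String) : Nat × String := (p.2.length, p.1)

-- B's loop body, after the subset filter has been pulled out of it.
def bsmStep (best : Option (Nat × String)) (p : String × List String) : Option (Nat × String) :=
  match best with
  | none => some (bsmKf p)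
  | some b => if bsmKeyLt (bsmKf p) b then some (bsmKf p) else some b

theorem bsmKeyLt_iff (a b : Nat × String) :
    bsmKeyLt a b = true ↔ toLex a < toLex b := by
  simp [bsmKeyLt, Prod.Lex.lt_iff]

-- sorted2's comparator is exactly the lexicographic strict order on (Nat, String) keys.
theorem bsm_before_eq {α : Type} (k1 : α → Nat) (k2 : α → String) :
    (fun a b => decide (k1 a < k1 b) || (!decide (k1 b < k1 a) && decide (k2 a < k2 b)))
      = (fun a b => decide (toLex (k1 a, k2 a) < toLex (k1 b, k2 b))) := by
  funext a b
  by_cases h1 : k1 a < k1 b <;> by_cases h2 : k1 b < k1 a <;>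
    by_cases h3 : k2 a < k2 b <;>
    simp [h1, h2, h3, Prod.Lex.lt_iff] <;> omega

theorem sorted2_eq_sorted_toLex {α : Type} (xs : List α) (k1 : α → Nat) (k2 : α → String) :
    PySem.List.sorted2 xs k1 k2 = PySem.List.sorted xs (fun x => toLex (k1 x, k2 x)) := by
  unfold PySem.List.sorted2 PySem.List.sorted
  rw [bsm_before_eq k1 k2]

-- The head of a sort is a minimum of the key.
theorem head_sorted_min {α κ : Type} [LinearOrder κ] (xs : List α) (key : α → κ)
    (h : xs ≠ []) :
    ∃ m, (PySem.List.sorted xs key).head? = some m ∧ m ∈ xs ∧ ∀ y ∈ xs, key m ≤ key y := by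
  have hperm := PySem.List.sorted_perm xs key false
  have hpw := PySem.List.sorted_pairwise xs key
  have hne : PySem.List.sorted xs key ≠ [] := by
    rw [Ne, PySem.List.sorted_eq_nil_iff]; exact h
  obtain ⟨m, t, hs⟩ := List.exists_cons_of_ne_nil hne
  refine ⟨m, by rw [hs]; rfl, ?_, ?_⟩
  · exact hperm.mem_iff.mp (by rw [hs]; exact List.mem_cons_self)
  · intro y hy
    have hy' : y ∈ PySem.List.sorted xs key := hperm.mem_iff.mpr hy
    rw [hs] at hy' hpw
    rcases List.mem_cons.mp hy' with rfl | hy''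
    · exact le_refl _
    · exact (List.pairwise_cons.mp hpw).1 y hy''

-- B's fold with a running best b returns a minimum of b and the keys of the list.
theorem bsm_fold_acc (l : List (String × List String)) (b : Nat × String) :
    ∃ r, l.foldl bsmStep (some b) = some r ∧ (r = b ∨ ∃ p ∈ l, r = bsmKf p) ∧
      toLex r ≤ toLex b ∧ ∀ q ∈ l, toLex r ≤ toLex (bsmKf q) := by
  induction l generalizing b with
  | nil => exact ⟨b, rfl, Or.inl rfl, le_refl _, by simp⟩
  | cons p l ih =>
    by_cases hlt : bsmKeyLt (bsmKf p) b = true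
    · obtain ⟨r, hr, hmem, hle, hall⟩ := ih (bsmKf p)
      refine ⟨r, ?_, ?_, ?_, ?_⟩
      · simpa [bsmStep, hlt] using hr
      · rcases hmem with rfl | ⟨q, hq, rfl⟩
        · exact Or.inr ⟨p, List.mem_cons_self, rfl⟩
        · exact Or.inr ⟨q, List.mem_cons_of_mem _ hq, rfl⟩
      · exact le_trans hle (le_of_lt ((bsmKeyLt_iff _ _).mp hlt))
      · intro q hq
        rcases List.mem_cons.mp hq with rfl | hq'
        · exact hle
        · exact hall q hq'
    · obtain ⟨r, hr, hmem, hle, hall⟩ := ih b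
      refine ⟨r, ?_, ?_, hle, ?_⟩
      · simpa [bsmStep, hlt] using hr
      · rcases hmem with rfl | ⟨q, hq, rfl⟩
        · exact Or.inl rfl
        · exact Or.inr ⟨q, List.mem_cons_of_mem _ hq, rfl⟩
      · intro q hq
        rcases List.mem_cons.mp hq with rfl | hq'
        · refine le_trans hle ?_
          have := (bsmKeyLt_iff (bsmKf q) b).not.mp (by simpa using hlt)
          exact le_of_not_gt this
        · exact hall q hq'

theorem bsm_fold_some (l : List (String × List String)) (h : l ≠ []) :
    ∃ p ∈ l, l.foldl bsmStep none = some (bsmKf p) ∧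
      ∀ q ∈ l, toLex (bsmKf p) ≤ toLex (bsmKf q) := by
  obtain ⟨p0, t, rfl⟩ := List.exists_cons_of_ne_nil h
  have hstep : List.foldl bsmStep none (p0 :: t) = List.foldl bsmStep (some (bsmKf p0)) t := rfl
  obtain ⟨r, hr, hmem, hle, hall⟩ := bsm_fold_acc t (bsmKf p0)
  rcases hmem with rfl | ⟨q, hq, rfl⟩
  · refine ⟨p0, List.mem_cons_self, by rw [hstep, hr], ?_⟩
    intro q hq
    rcases List.mem_cons.mp hq with rfl | hq'
    · exact le_refl _
    · exact hall q hq'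
  · refine ⟨q, List.mem_cons_of_mem _ hq, by rw [hstep, hr], ?_⟩
    intro q' hq'
    rcases List.mem_cons.mp hq' with rfl | hq''
    · exact hle
    · exact hall q' hq''

-- Core: head of A's sorted matches list = B's running minimum, over the filtered entries,
-- provided looking a filtered code up in token_map returns that entry's token list.
theorem bsm_main (tm fl : List (String × List String))
    (hsub : ∀ p ∈ fl, PySem.Dict.getD ⟨tm⟩ p.1 ([] : List String) = p.2) (hne : fl ≠ []) :
    (PySem.List.sorted2 (fl.map Prod.fst)
        (fun c => (PySem.Dict.getD ⟨tm⟩ c ([] : List String)).length) (fun c => c)).head?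
      = (fl.foldl bsmStep none).map Prod.snd := by
  rw [sorted2_eq_sorted_toLex]
  set key : String → Lex (Nat × String) :=
    fun c => toLex ((PySem.Dict.getD ⟨tm⟩ c ([] : List String)).length, c) with hkeydef
  have hkey : ∀ q ∈ fl, key q.1 = toLex (bsmKf q) := by
    intro q hq
    simp [hkeydef, bsmKf, hsub q hq]
  have hmne : fl.map Prod.fst ≠ [] := by
    simpa [List.map_eq_nil_iff] using hne
  obtain ⟨m, hhead, hm, hmin⟩ := head_sorted_min (fl.map Prod.fst) key hmne
  obtain ⟨p, hp, hfold, hpmin⟩ := bsm_fold_some fl hne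
  obtain ⟨qm, hqm, hqm1⟩ := List.mem_map.mp hm
  have h1 : key m ≤ toLex (bsmKf p) := by
    have := hmin p.1 (List.mem_map.mpr ⟨p, hp, rfl⟩)
    rwa [hkey p hp] at this
  have h2 : toLex (bsmKf p) ≤ key m := by
    have := hpmin qm hqm
    rwa [← hkey qm hqm, hqm1] at this
  have heq : toLex (bsmKf p) = key m := le_antisymm h2 h1
  have hm2 : (bsmKf p).2 = m := by
    have : bsmKf p = ((PySem.Dict.getD ⟨tm⟩ m ([] : List String)).length, m) := by
      have := heq
      simp only [hkeydef] at this
      exact_mod_cast congrArg (fun x : Lex (Nat × String) => ofLex x) this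
    rw [this]
  rw [hfold, hhead, Option.map_some, hm2]

theorem bsm_final (tokens : List String) (token_map : List (String × List String))
    (hpre : (token_map.map Prod.fst).Nodup ∧ ∀ p ∈ token_map, p.2.Nodup) :
    best_subset_match_py tokens token_map = best_subset_match_py_alt tokens token_map := by
  unfold best_subset_match_py best_subset_match_py_alt
  by_cases hreq : PySem.Set.ofList tokens = []
  · simp [hreq]
  · simp only [if_neg hreq]
    rw [PySem.List.foldl_append_if
      (p := fun q : String × List String => PySem.Set.issubset (PySem.Set.ofList tokens) q.2)
      (f := Prod.fst)]
    have hstep : (fun (best : Option (Nat × String)) (p : String × List String) =>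
        match best with
        | none => some (p.2.length, p.1)
        | some b => if bsmKeyLt (p.2.length, p.1) b then some (p.2.length, p.1) else some b)
        = bsmStep := rfl
    rw [PySem.List.foldl_if_eq_foldl_filter
      (p := fun q : String × List String => PySem.Set.issubset (PySem.Set.ofList tokens) q.2)
      (f := fun (best : Option (Nat × String)) (p : String × List String) =>
        match best with
        | none => some (p.2.length, p.1)
        | some b => if bsmKeyLt (p.2.length, p.1) b then some (p.2.length, p.1) else some b),
      hstep]
    simp only [List.nil_append]
    set fl := token_map.filter
      (fun q : String × List String => PySem.Set.issubset (PySem.Set.ofList tokens) q.2) with hfl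
    by_cases hne : fl = []
    · simp [hne]
    · have hmne : fl.map Prod.fst ≠ [] := by simpa [List.map_eq_nil_iff] using hne
      rw [if_neg hmne]
      refine bsm_main token_map fl ?_ hne
      intro p hp
      have hptm : p ∈ token_map := List.mem_filter.mp (hfl ▸ hp) |>.1
      have hget : PySem.Dict.get? (⟨token_map⟩ : PySem.Dict String (List String)) p.1 = some p.2 := by
        apply PySem.Dict.get?_of_mem_items
        · exact hptm
        · simpa [PySem.Dict.keys] using hpre.1
      exact PySem.Dict.getD_of_get?_eq_some _ _ hget

-- ===== VERDICT (by name: the statement is the Claim_ definition above) =====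
theorem best_subset_match_py_spec : Claim_equal_best_subset_match_py := by
  intro tokens token_map _ hpre
  unfold Pre_best_subset_match_py at hpre
  unfold Spec_best_subset_match_py
  exact bsm_final tokens token_map hpre
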